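-- pv_equiv track=rewrite | github.com/IAPOLINARIO/100-days-of-code | Month-1/Week-1/day-05/py2/main.py | findSockPairs
-- ===== SOURCE A (Python) =====
-- def findSockPairs(drawer):
--
--   socks=list(drawer)
--   count=0
--
--   for key in range(0, len(socks)):
--     sockLetter=socks[key]
--     for sockDrawer in socks[key+1:len(socks)]:
--       if sockLetter == sockDrawer:
--         count+=1
--         break
--
--   return count
-- ===== SOURCE B (Python) =====
-- def findSockPairs(drawer):
--   count = 0
--   seen = set()
--   for sock in drawer:
--     if sock in seen:
--       count += 1
--     else:
--       seen.add(sock)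
--   return count
-- ===== Notes on version B (the rewrite author's own statement) =====
-- stated objective: faster
-- what changed: Replaces A's nested scan (for each sock, scan the rest of the drawer for a later duplicate) with a single pass keeping a set of already-seen socks and counting repeats; both equal len(drawer) - number of distinct socks.
import Mathlib
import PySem

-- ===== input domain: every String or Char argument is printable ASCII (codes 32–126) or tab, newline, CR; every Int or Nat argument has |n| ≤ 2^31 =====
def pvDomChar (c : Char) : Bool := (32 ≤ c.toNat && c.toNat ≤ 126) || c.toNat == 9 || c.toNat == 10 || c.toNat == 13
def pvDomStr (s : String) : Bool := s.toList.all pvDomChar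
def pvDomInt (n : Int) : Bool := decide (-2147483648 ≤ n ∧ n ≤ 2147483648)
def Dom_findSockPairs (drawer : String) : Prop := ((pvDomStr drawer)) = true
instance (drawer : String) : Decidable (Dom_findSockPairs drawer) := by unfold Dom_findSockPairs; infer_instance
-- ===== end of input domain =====

-- B replaces A's quadratic nested later-duplicate scan by a single pass with a set of seen socks (objective: faster).

-- ===== PORT A =====
-- inner 'for sockDrawer in socks[key+1:]: if ==: count+=1; break'
def pvInnerA (sockLetter : Char) (rest : List Char) (count : Int) : Int :=
  match rest with
  | [] => count
  | d :: t => if sockLetter == d then count + 1 else pvInnerA sockLetter t count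

def findSockPairs (drawer : String) : Int :=
  let socks := drawer.toList
  (PySem.List.pyRange 0 socks.length 1).foldl
    (fun count key =>
      let sockLetter := PySem.List.pyGetD socks key ' '   -- socks[key]; key is always in range here
      pvInnerA sockLetter (PySem.List.slice socks (some (key + 1)) (some socks.length)) count)
    0

-- ===== PORT B =====
def findSockPairs_alt (drawer : String) : Int :=
  (drawer.toList.foldl
    (fun (st : Int × PySem.Set Char) sock =>
      if PySem.Set.contains st.2 sock then (st.1 + 1, st.2) else (st.1, PySem.Set.add st.2 sock))
    (0, PySem.Set.empty)).1

-- ===== PRECONDITION & SPEC =====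
def Spec_findSockPairs (drawer : String) (out : Int) : Prop := out = findSockPairs_alt drawer
instance (drawer : String) (out : Int) : Decidable (Spec_findSockPairs drawer out) := by unfold Spec_findSockPairs; infer_instance

-- ===== CLAIM (what is proved, stated in full; the proofs are below) =====
def Claim_equal_findSockPairs : Prop := ∀ (drawer : String), Dom_findSockPairs drawer → Spec_findSockPairs drawer (findSockPairs drawer)

-- ===== LEMMAS AND PROOFS =====

-- number of positions having a later equal element, by head recursion
def pvCountA (l : List Char) : Int :=
  match l with
  | [] => 0
  | c :: t => (if c ∈ t then 1 else 0) + pvCountA t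

theorem pvInnerA_eq (c : Char) (rest : List Char) (count : Int) :
    pvInnerA c rest count = count + (if c ∈ rest then 1 else 0) := by
  induction rest generalizing count with
  | nil => simp [pvInnerA]
  | cons d t ih =>
    by_cases h : c = d
    · simp [pvInnerA, h]
    · simp [pvInnerA, h, ih]

theorem pvA_loop (socks : List Char) (k : Nat) (count : Int) :
    (PySem.List.pyRange (k : Int) socks.length 1).foldl
      (fun count key =>
        pvInnerA (PySem.List.pyGetD socks key ' ')
          (PySem.List.slice socks (some (key + 1)) (some socks.length)) count)
      count = count + pvCountA (socks.drop k) := by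
  by_cases hk : k < socks.length
  · rw [PySem.List.pyRange_one_cons (by exact_mod_cast hk)]
    have hd : socks.drop k = socks[k] :: socks.drop (k + 1) :=
      List.drop_eq_getElem_cons hk
    simp only [List.foldl_cons]
    have hget : PySem.List.pyGetD socks (k : Int) ' ' = socks[k] := by
      simp [PySem.List.pyGetD_natCast, List.getD_eq_getElem?_getD, hk]
    have hslice : PySem.List.slice socks (some ((k : Int) + 1)) (some (socks.length : Int))
        = socks.drop (k + 1) := by
      have : ((k : Int) + 1) = ((k + 1 : Nat) : Int) := by push_cast; ring
      rw [this, PySem.List.slice_natCast]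
      simp
    have ih := pvA_loop socks (k + 1)
        (pvInnerA (PySem.List.pyGetD socks (k : Int) ' ')
          (PySem.List.slice socks (some ((k : Int) + 1)) (some (socks.length : Int))) count)
    push_cast at ih ⊢
    rw [ih, hget, hslice, pvInnerA_eq, hd]
    simp [pvCountA]
    ring
  · rw [PySem.List.pyRange_one_eq_nil (by exact_mod_cast Nat.le_of_not_lt hk)]
    rw [List.drop_eq_nil_of_le (Nat.le_of_not_lt hk)]
    simp [pvCountA]
termination_by socks.length - k

theorem pvCountA_eq (l : List Char) :
    pvCountA l = (l.length : Int) - (l.toFinset.card : Int) := by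
  induction l with
  | nil => simp [pvCountA]
  | cons c t ih =>
    by_cases h : c ∈ t
    · have h2 : (c :: t).toFinset = t.toFinset := by
        simp [List.toFinset_cons, h]
      simp only [pvCountA, h, if_true, ih, h2, List.length_cons]
      push_cast
      ring
    · have hc : c ∉ t.toFinset := by simpa using h
      have h2 : (c :: t).toFinset.card = t.toFinset.card + 1 := by
        simp [List.toFinset_cons, Finset.card_insert_of_notMem hc]
      simp only [pvCountA, h, if_false, ih, h2, List.length_cons]
      push_cast
      ring

theorem pv_card_insert_sdiff {c : Char} {T S : Finset Char} (hc : c ∉ S) :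
    (insert c T \ S).card = (T \ insert c S).card + 1 := by
  have h1 : insert c T \ S = insert c (T \ S) := by
    ext x
    simp only [Finset.mem_sdiff, Finset.mem_insert]
    constructor
    · rintro ⟨h | h, hs⟩
      · exact Or.inl h
      · exact Or.inr ⟨h, hs⟩
    · rintro (h | ⟨h, hs⟩)
      · exact ⟨Or.inl h, h ▸ hc⟩
      · exact ⟨Or.inr h, hs⟩
  have h2 : T \ insert c S = (T \ S).erase c := Finset.sdiff_insert T S c
  rw [h1, h2]
  by_cases hx : c ∈ T \ S
  · rw [Finset.insert_eq_self.mpr hx, Finset.card_erase_of_mem hx]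
    have := Finset.card_pos.mpr ⟨c, hx⟩
    omega
  · rw [Finset.card_insert_of_notMem hx, Finset.erase_eq_of_notMem hx]

theorem pvB_loop (l : List Char) (count : Int) (seen : PySem.Set Char) :
    (l.foldl
      (fun (st : Int × PySem.Set Char) sock =>
        if PySem.Set.contains st.2 sock then (st.1 + 1, st.2) else (st.1, PySem.Set.add st.2 sock))
      (count, seen)).1
    = count + (l.length : Int) - ((l.toFinset \ seen.toFinset).card : Int) := by
  induction l generalizing count seen with
  | nil => simp
  | cons c t ih =>
    by_cases h : PySem.Set.contains seen c = true
    · have hcs : c ∈ seen.toFinset := by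
        simpa [PySem.Set.contains] using h
      have hsd : (c :: t).toFinset \ seen.toFinset = t.toFinset \ seen.toFinset := by
        simp [List.toFinset_cons, Finset.insert_sdiff_of_mem _ hcs]
      simp only [List.foldl_cons, h, if_true, ih, hsd, List.length_cons]
      push_cast
      ring
    · have hcs : c ∉ seen.toFinset := by
        simpa [PySem.Set.contains] using h
      have hadd : (PySem.Set.add seen c).toFinset = insert c seen.toFinset := by
        simp only [PySem.Set.add, PySem.Set.contains] at *
        rw [if_neg (by simpa using h)]
        simp [List.toFinset_append]
      have hcard := pv_card_insert_sdiff (T := t.toFinset) hcs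
      rw [List.foldl_cons, if_neg h]
      simp only [ih, List.toFinset_cons, List.length_cons]
      rw [hadd]
      push_cast
      omega

-- ===== VERDICT (by name: the statement is the Claim_ definition above) =====
theorem findSockPairs_spec : Claim_equal_findSockPairs := by
  intro drawer _
  unfold Spec_findSockPairs findSockPairs findSockPairs_alt
  have hA := pvA_loop drawer.toList 0 0
  have hB := pvB_loop drawer.toList 0 PySem.Set.empty
  simp only [Nat.cast_zero] at hA
  rw [hA, hB, pvCountA_eq]
  simp [PySem.Set.empty]
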